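-- pv_equiv track=rewrite | github.com/DigiMediaCompany/VideoTextExtract | api.py | is_processed
-- ===== SOURCE A (Python) =====
-- from enum import Enum
--
-- class ProgressStatus(str, Enum):
--     GOING = "Going"
--     SUCCESS = "Success"
--     FAILED = "Failed"
--     STANDBY = "Standby"
--
-- def is_processed(job_data: dict) -> bool:
--     """Return True if job is already processed"""
--     progress = job_data.get("progress", [])
--     if not progress:
--         return False
--
--     # Condition 1: any Failed
--     if any(p["status"] == ProgressStatus.FAILED for p in progress):
--         return True
--
--     # Condition 2: all Success
--     if all(p["status"] == ProgressStatus.SUCCESS for p in progress):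
--         return True
--     return False
-- ===== SOURCE B (Python) =====
-- from enum import Enum
--
-- class ProgressStatus(str, Enum):
--     GOING = "Going"
--     SUCCESS = "Success"
--     FAILED = "Failed"
--     STANDBY = "Standby"
--
-- def is_processed(job_data: dict) -> bool:
--     """Return True if job is already processed (single pass)."""
--     progress = job_data.get("progress", [])
--     if not progress:
--         return False
--     all_success = True
--     for p in progress:
--         s = p["status"]
--         if s == ProgressStatus.FAILED:
--             return True
--         if s != ProgressStatus.SUCCESS:
--             all_success = False
--     return all_success
-- ===== Notes on version B (the rewrite author's own statement) =====
-- stated objective: alternative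
-- what changed: A's two sequential generator scans (any Failed, then all Success) are fused into one loop that returns True on the first Failed and otherwise accumulates an all_success flag.
import Mathlib
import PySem

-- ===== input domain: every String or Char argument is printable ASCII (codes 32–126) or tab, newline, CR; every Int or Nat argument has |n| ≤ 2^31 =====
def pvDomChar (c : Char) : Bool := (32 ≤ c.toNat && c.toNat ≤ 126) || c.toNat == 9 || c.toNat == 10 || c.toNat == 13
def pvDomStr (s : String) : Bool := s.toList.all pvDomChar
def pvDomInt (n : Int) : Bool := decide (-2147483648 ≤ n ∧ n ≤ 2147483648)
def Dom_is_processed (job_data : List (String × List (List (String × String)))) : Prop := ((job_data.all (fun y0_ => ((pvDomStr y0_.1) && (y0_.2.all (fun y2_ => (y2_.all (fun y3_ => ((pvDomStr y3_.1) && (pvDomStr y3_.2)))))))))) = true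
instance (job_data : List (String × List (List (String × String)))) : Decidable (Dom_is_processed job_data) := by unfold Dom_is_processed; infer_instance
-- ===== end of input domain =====

-- B fuses A's two generator scans (any Failed, then all Success) into one loop with an
-- accumulated all_success flag; same return value everywhere A returns (objective: alternative).
-- ===== PORT A =====
def is_processed (job_data : List (String × List (List (String × String)))) : Bool :=
  let progress := (PySem.Dict.mk job_data).getD "progress" []
  if progress.isEmpty then false
  else if progress.any (fun p => (PySem.Dict.mk p).getD "status" "" == "Failed") then true
  else if progress.all (fun p => (PySem.Dict.mk p).getD "status" "" == "Success") then true
  else false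

-- ===== PORT B =====
-- the single fused loop of Source B: returns true at the first Failed, else threads all_success
def isProcessedLoop : List (List (String × String)) → Bool → Bool
  | [], all_success => all_success
  | p :: rest, all_success =>
    let s := (PySem.Dict.mk p).getD "status" ""
    if s == "Failed" then true
    else if s != "Success" then isProcessedLoop rest false
    else isProcessedLoop rest all_success

def is_processed_alt (job_data : List (String × List (List (String × String)))) : Bool :=
  let progress := (PySem.Dict.mk job_data).getD "progress" []
  if progress.isEmpty then false
  else isProcessedLoop progress true

-- ===== PRECONDITION & SPEC =====
-- Pre_ excludes exactly the inputs on which Python A raises KeyError: a progress entry with no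
-- "status" key that is reached before any "Failed" entry (B raises identically there).
def Pre_is_processed (job_data : List (String × List (List (String × String)))) : Prop :=
  let progress := (PySem.Dict.mk job_data).getD "progress" []
  ∀ i < progress.length,
    ((PySem.Dict.mk progress[i]!).get? "status").isNone = true →
    (progress.take i).any (fun p => (PySem.Dict.mk p).getD "status" "" == "Failed") = true
instance (job_data : List (String × List (List (String × String)))) : Decidable (Pre_is_processed job_data) := by unfold Pre_is_processed; infer_instance

def pvWitness_is_processed : (List (String × List (List (String × String)))) :=
  [("progress", [[("status", "Success")], [("status", "Going")]])]

def Spec_is_processed (job_data : List (String × List (List (String × String)))) (out : Bool) : Prop := out = is_processed_alt job_data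
instance (job_data : List (String × List (List (String × String)))) (out : Bool) : Decidable (Spec_is_processed job_data out) := by unfold Spec_is_processed; infer_instance

-- ===== CLAIM (what is proved, stated in full; the proofs are below) =====
def Claim_equal_is_processed : Prop := ∀ (job_data : List (String × List (List (String × String)))), Dom_is_processed job_data → Pre_is_processed job_data → Spec_is_processed job_data (is_processed job_data)

-- ===== LEMMAS AND PROOFS =====

-- the fused loop computes "any Failed, else all_success ∧ all Success"
theorem isProcessedLoop_eq (ps : List (List (String × String))) (acc : Bool) :
    isProcessedLoop ps acc =
      (ps.any (fun p => (PySem.Dict.mk p).getD "status" "" == "Failed") ||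
       (acc && ps.all (fun p => (PySem.Dict.mk p).getD "status" "" == "Success"))) := by
  induction ps generalizing acc with
  | nil => simp [isProcessedLoop]
  | cons p rest ih =>
    simp only [isProcessedLoop, List.any_cons, List.all_cons]
    by_cases hf : ((PySem.Dict.mk p).getD "status" "" == "Failed") = true
    · simp [hf]
    · simp only [Bool.not_eq_true] at hf
      by_cases hs : ((PySem.Dict.mk p).getD "status" "" == "Success") = true
      · rw [if_neg (by simp [hf]), if_neg (by simpa using hs), ih]
        simp [hf, hs]
      · simp only [Bool.not_eq_true] at hs
        rw [if_neg (by simp [hf]), if_pos (by simpa using hs), ih]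
        simp [hf, hs]

-- ===== VERDICT (by name: the statement is the Claim_ definition above) =====
theorem is_processed_spec : Claim_equal_is_processed := by
  intro job_data _ _
  unfold Spec_is_processed is_processed is_processed_alt
  set ps := (PySem.Dict.mk job_data).getD "progress" [] with hps
  by_cases he : ps.isEmpty
  · simp [he]
  · simp only [he, isProcessedLoop_eq]
    by_cases hf : ps.any (fun p => (PySem.Dict.mk p).getD "status" "" == "Failed")
    · simp [hf]
    · by_cases ha : ps.all (fun p => (PySem.Dict.mk p).getD "status" "" == "Success") <;>
        simp [hf, ha]
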